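-- pv_equiv track=rewrite | github.com/kevingrip/figus | conversor_libertadores.py | conversorLibertadores
-- ===== SOURCE A (Python) =====
-- def conversorLibertadores(figuritas):
--
--     #libertadores='CL2, CL4, 95, 126, 204, 213, 242, 256, 265, 270, 290, 311, 333, 358, 359, 360, 387, 413, 432, 435, 450, 511, 543'
--     libertadores_figu=''
--     listaLibertadores = []
--
--     for i in figuritas:
--         if i in ('.',',','y','-'):
--             listaLibertadores.append(libertadores_figu)
--             libertadores_figu=''
--         elif i !=' ':
--             libertadores_figu=libertadores_figu+i
--
--     #libertadores_figu="'"+libertadores_figu+"'"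
--     listaLibertadores.append(libertadores_figu)
--
--
--     return (listaLibertadores)
-- ===== SOURCE B (Python) =====
-- def conversorLibertadores(figuritas):
--     s = figuritas.replace(' ', '')
--     s = s.replace('.', ',').replace('y', ',').replace('-', ',')
--     return s.split(',')
-- ===== Notes on version B (the rewrite author's own statement) =====
-- stated objective: simpler
-- what changed: Replaces A's char-by-char loop with an explicit token accumulator by a loop-free string pipeline: strip spaces with replace, normalise the delimiters '.', 'y', '-' to ',' with replace, then split once on ','.
import Mathlib
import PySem

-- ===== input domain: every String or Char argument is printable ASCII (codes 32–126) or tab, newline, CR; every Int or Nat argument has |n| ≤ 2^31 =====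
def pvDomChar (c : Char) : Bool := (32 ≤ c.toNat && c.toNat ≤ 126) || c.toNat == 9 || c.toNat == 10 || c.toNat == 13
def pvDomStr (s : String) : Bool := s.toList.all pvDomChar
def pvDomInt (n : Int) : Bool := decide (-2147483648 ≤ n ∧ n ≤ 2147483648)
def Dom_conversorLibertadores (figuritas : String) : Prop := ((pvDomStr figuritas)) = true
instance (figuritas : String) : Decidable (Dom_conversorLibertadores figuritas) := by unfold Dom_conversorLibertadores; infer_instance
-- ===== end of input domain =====

-- B replaces A's char-by-char accumulator loop with a loop-free pipeline: strip spaces,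
-- normalise all delimiters to ',', split once (simpler/idiomatic; same behaviour, incl. empty tokens).

-- ===== PORT A =====
-- the 'for i in figuritas' loop: state = (current token, list built so far), both over List Char
def pvGoA : List Char → List Char → List (List Char) → List (List Char)
  | [], cur, acc => acc ++ [cur]
  | i :: rest, cur, acc =>
    if i = '.' ∨ i = ',' ∨ i = 'y' ∨ i = '-' then pvGoA rest [] (acc ++ [cur])
    else if i ≠ ' ' then pvGoA rest (cur ++ [i]) acc
    else pvGoA rest cur acc

def conversorLibertadores (figuritas : String) : List String :=
  (pvGoA figuritas.toList [] []).map String.ofList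

-- ===== PORT B =====
def conversorLibertadores_alt (figuritas : String) : List String :=
  (PySem.Chars.splitOn
    (PySem.Chars.replace (PySem.Chars.replace (PySem.Chars.replace
      (PySem.Chars.replace figuritas.toList [' '] []) ['.'] [',']) ['y'] [',']) ['-'] [','])
    [',']).map String.ofList

-- ===== PRECONDITION & SPEC =====
def Spec_conversorLibertadores (figuritas : String) (out : List String) : Prop := out = conversorLibertadores_alt figuritas
instance (figuritas : String) (out : List String) : Decidable (Spec_conversorLibertadores figuritas out) := by unfold Spec_conversorLibertadores; infer_instance

-- ===== CLAIM (what is proved, stated in full; the proofs are below) =====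
def Claim_equal_conversorLibertadores : Prop := ∀ (figuritas : String), Dom_conversorLibertadores figuritas → Spec_conversorLibertadores figuritas (conversorLibertadores figuritas)

-- ===== LEMMAS AND PROOFS =====

-- per-char effect of B's whole pipeline before the split
def pvG (c : Char) : List Char :=
  if c = ' ' then []
  else if c = '.' then [','] else if c = 'y' then [','] else if c = '-' then [','] else [c]

-- structural form of B's split on the single-char separator ','
def pvSplit : List Char → List Char × List (List Char)
  | [] => ([], [])
  | c :: t =>
    let p := pvSplit t
    if c = ',' then ([], p.1 :: p.2) else (c :: p.1, p.2)

theorem pv_rgo_eq (a : Char) (new : List Char) :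
    ∀ (l : List Char) (fuel : Nat) (acc : List Char), l.length ≤ fuel →
    PySem.Chars.replace.go [a] new fuel l acc
      = acc.reverse ++ l.flatMap (fun c => if c = a then new else [c]) := by
  intro l
  induction l with
  | nil => intro fuel acc _; cases fuel <;> simp [PySem.Chars.replace.go]
  | cons c t ih =>
    intro fuel acc h
    cases fuel with
    | zero => simp at h
    | succ f =>
      simp only [PySem.Chars.replace.go, List.isPrefixOf,
        Bool.and_true]
      by_cases hc : c = a
      · subst hc
        rw [if_pos (by simp)]
        simp only [List.length_cons, List.length_nil, List.drop_succ_cons, List.drop_zero]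
        rw [ih f (new.reverse ++ acc) (by simpa using Nat.le_of_succ_le_succ h)]
        simp
      · rw [if_neg (by simp [Ne.symm hc])]
        rw [ih f (c :: acc) (by simpa using Nat.le_of_succ_le_succ h)]
        simp [hc]

theorem pv_replace_single (l : List Char) (a : Char) (new : List Char) :
    PySem.Chars.replace l [a] new = l.flatMap (fun c => if c = a then new else [c]) := by
  simp [PySem.Chars.replace, pv_rgo_eq a new l l.length [] le_rfl]

theorem pv_sgo_eq :
    ∀ (l : List Char) (fuel : Nat) (cur : List Char) (acc : List (List Char)), l.length ≤ fuel →
    PySem.Chars.splitOn.go [','] fuel l cur acc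
      = acc.reverse ++ (cur.reverse ++ (pvSplit l).1) :: (pvSplit l).2 := by
  intro l
  induction l with
  | nil => intro fuel cur acc _; cases fuel <;> simp [PySem.Chars.splitOn.go, pvSplit]
  | cons c t ih =>
    intro fuel cur acc h
    cases fuel with
    | zero => simp at h
    | succ f =>
      simp only [PySem.Chars.splitOn.go, List.isPrefixOf,
        Bool.and_true]
      by_cases hc : c = ','
      · subst hc
        rw [if_pos (by simp)]
        simp only [List.length_cons, List.length_nil, List.drop_succ_cons, List.drop_zero]
        rw [ih f [] (cur.reverse :: acc) (by simpa using Nat.le_of_succ_le_succ h)]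
        simp [pvSplit]
      · rw [if_neg (by simp [Ne.symm hc])]
        rw [ih f (c :: cur) acc (by simpa using Nat.le_of_succ_le_succ h)]
        simp [pvSplit, hc]

theorem pv_splitOn_single (l : List Char) :
    PySem.Chars.splitOn l [','] = (pvSplit l).1 :: (pvSplit l).2 := by
  simp [PySem.Chars.splitOn, pv_sgo_eq l (l.length + 1) [] [] (Nat.le_succ _)]

-- B's four replaces collapse to one per-char flatMap
theorem pv_chain_eq (l : List Char) :
    PySem.Chars.replace
      (PySem.Chars.replace
        (PySem.Chars.replace (PySem.Chars.replace l [' '] []) ['.'] [',']) ['y'] [','])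
      ['-'] [','] = l.flatMap pvG := by
  simp only [pv_replace_single]
  induction l with
  | nil => simp
  | cons c t ih =>
    simp only [List.flatMap_cons, List.flatMap_append, ih]
    congr 1
    by_cases h1 : c = ' ' <;> by_cases h2 : c = '.' <;> by_cases h3 : c = 'y' <;>
      by_cases h4 : c = '-' <;> simp_all [pvG]

-- A's loop computes B's split of the substituted string
theorem pv_goA_eq :
    ∀ (l : List Char) (cur : List Char) (acc : List (List Char)),
    pvGoA l cur acc
      = acc ++ (cur ++ (pvSplit (l.flatMap pvG)).1) :: (pvSplit (l.flatMap pvG)).2 := by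
  intro l
  induction l with
  | nil => intro cur acc; simp [pvGoA, pvSplit]
  | cons c t ih =>
    intro cur acc
    by_cases hd : c = '.' ∨ c = ',' ∨ c = 'y' ∨ c = '-'
    · have hg : pvG c = [','] := by
        rcases hd with h | h | h | h <;> subst h <;> simp [pvG]
      simp only [pvGoA, if_pos hd, ih, List.flatMap_cons, hg]
      simp [pvSplit]
    · by_cases hs : c = ' '
      · subst hs
        simp only [pvGoA]
        rw [if_neg hd, if_neg (by simp)]
        simp only [ih, List.flatMap_cons, pvG]
        simp
      · have hg : pvG c = [c] := by simp [pvG, hs]; push Not at hd; simp [hd.1, hd.2.2.1, hd.2.2.2]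
        simp only [pvGoA]
        rw [if_neg hd, if_pos (by simpa using hs)]
        simp only [ih, List.flatMap_cons, hg]
        have hcc : c ≠ ',' := by push Not at hd; exact hd.2.1
        simp [pvSplit, hcc]

-- ===== VERDICT (by name: the statement is the Claim_ definition above) =====
theorem conversorLibertadores_spec : Claim_equal_conversorLibertadores := by
  intro s _
  unfold Spec_conversorLibertadores conversorLibertadores conversorLibertadores_alt
  rw [pv_chain_eq, pv_splitOn_single, pv_goA_eq]
  simp
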